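-- pv_equiv track=rewrite | github.com/dijasila/Atomic-Simulation-Recipees | asr/database/duplicates.py | parse_filter_string
-- ===== SOURCE A (Python) =====
-- def parse_filter_string(filterstring):
--     """Parse a comma separated filter string.
--
--     Parameters
--     ----------
--     filterstring: str
--         Comma separated filter string, i.e. '<energy,<=natoms'
--
--     Returns
--     -------
--     ops_and_keys: List[Tuple(str, str)]
--         For the above example would return [('<', 'energy'), ('<=', 'natoms')].
--
--     """
--     filters = filterstring.split(',')
--     sorts = ['<=', '>=', '==', '>', '<']
--     ops_and_keys = []
--     for filt in filters:
--         for op in sorts: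
--             if filt.startswith(op):
--                 break
--         else:
--             raise ValueError(f'Unknown sorting operator in filterstring={filt}.')
--         key = filt[len(op):]
--         ops_and_keys.append((op, key))
--     return ops_and_keys
-- ===== SOURCE B (Python) =====
-- def parse_filter_string(filterstring):
--     """Streaming rewrite: consume the raw string left to right (operator, then
--     key up to the next comma) with str.partition, instead of splitting on
--     commas first and scanning an ordered operator list per token."""
--     ops_and_keys = []
--     rest = filterstring
--     while True:
--         if rest[:2] in ('<=', '>=', '=='):
--             op, rest = rest[:2], rest[2:]
--         elif rest[:1] in ('<', '>'):
--             op, rest = rest[:1], rest[1:]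
--         else:
--             bad = rest.partition(',')[0]
--             raise ValueError(f'Unknown sorting operator in filterstring={bad}.')
--         key, sep, rest = rest.partition(',')
--         ops_and_keys.append((op, key))
--         if not sep:
--             return ops_and_keys
-- ===== Notes on version B (the rewrite author's own statement) =====
-- stated objective: alternative
-- what changed: Replaced split-then-scan (comma split plus an ordered operator-list loop with break/else per token) by a single left-to-right streaming consumer that peels an operator and then the key up to the next comma with str.partition, never materialising the token list.
import Mathlib
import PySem

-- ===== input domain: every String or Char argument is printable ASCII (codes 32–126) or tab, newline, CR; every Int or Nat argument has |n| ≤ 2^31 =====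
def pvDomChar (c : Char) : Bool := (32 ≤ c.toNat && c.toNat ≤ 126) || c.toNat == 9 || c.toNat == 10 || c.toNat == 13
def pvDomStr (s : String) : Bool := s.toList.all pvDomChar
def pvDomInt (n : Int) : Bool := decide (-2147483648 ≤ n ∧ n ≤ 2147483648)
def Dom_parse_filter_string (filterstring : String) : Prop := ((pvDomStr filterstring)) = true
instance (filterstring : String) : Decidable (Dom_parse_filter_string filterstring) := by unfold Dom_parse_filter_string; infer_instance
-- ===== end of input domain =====

-- B replaces A's split-then-scan (comma split + ordered operator-list loop with
-- break/else) by one streaming pass that peels an operator and then the key up to the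
-- next comma via str.partition; same values, no speed claim.

-- ===== PORT A =====
-- inner 'for op in sorts: if filt.startswith(op): break / else: raise';
-- none = the loop fell through, i.e. the ValueError
def pvA_findOp (filt : List Char) : List (List Char) → Option (List Char)
  | [] => none
  | op :: ops => if PySem.Chars.startswith filt op then some op else pvA_findOp filt ops

-- per-token body: find op, then key = filt[len(op):]
def pvA_tok (filt : List Char) : Option (String × String) :=
  match pvA_findOp filt ["<=".toList, ">=".toList, "==".toList, ">".toList, "<".toList] with
  | none => none
  | some op =>
    some (String.ofList op,
          String.ofList (PySem.List.slice filt (some (op.length : Int)) none))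

-- outer loop over filterstring.split(','); none = the raise propagates
def pvA_go : List (List Char) → Option (List (String × String))
  | [] => some []
  | f :: fs =>
    match pvA_tok f with
    | none => none
    | some p => (pvA_go fs).map (p :: ·)

def parse_filter_string (filterstring : String) : List (String × String) :=
  (pvA_go (PySem.Chars.splitOn filterstring.toList [','])).getD []

-- ===== PORT B =====
-- rest[:2] in ('<=','>=','==') / rest[:1] in ('<','>'): peel the operator;
-- none = neither branch fires, i.e. the ValueError
def pvB_op (s : List Char) : Option (List Char × List Char) :=
  if s.take 2 = ['<', '='] ∨ s.take 2 = ['>', '='] ∨ s.take 2 = ['=', '='] then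
    some (s.take 2, s.drop 2)
  else if s.take 1 = ['<'] ∨ s.take 1 = ['>'] then
    some (s.take 1, s.drop 1)
  else none

-- str.partition(','): (before, found-separator?, after)
def pvB_part : List Char → List Char × Bool × List Char
  | [] => ([], false, [])
  | c :: t =>
    if c = ',' then ([], true, t)
    else
      let (k, b, r) := pvB_part t
      (c :: k, b, r)

-- length facts the while-loop's termination rests on (cited by decreasing_by)
theorem pvB_part_len (s : List Char) : (pvB_part s).2.2.length ≤ s.length := by
  induction s with
  | nil => simp [pvB_part]
  | cons c t ih =>
    by_cases h : c = ','
    · simp [pvB_part, h]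
    · simpa [pvB_part, h] using Nat.le_succ_of_le ih

theorem pvB_op_len (s : List Char) (op rest : List Char)
    (h : pvB_op s = some (op, rest)) : rest.length < s.length := by
  unfold pvB_op at h
  split_ifs at h with h1 h2
  · cases h
    have h2' : (s.take 2).length = 2 := by rcases h1 with h | h | h <;> rw [h] <;> rfl
    rw [List.length_take] at h2'
    simp only [List.length_drop]
    omega
  · cases h
    have h1' : (s.take 1).length = 1 := by rcases h2 with h | h <;> rw [h] <;> rfl
    rw [List.length_take] at h1'
    simp only [List.length_drop]
    omega

-- the while loop: peel op, partition off the key, loop on the remainder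
def pvB_go (s : List Char) : Option (List (String × String)) :=
  match hop : pvB_op s with
  | none => none
  | some (op, rest) =>
    match hpt : pvB_part rest with
    | (key, true, r) =>
      (pvB_go r).map ((String.ofList op, String.ofList key) :: ·)
    | (key, false, _) =>
      some [(String.ofList op, String.ofList key)]
termination_by s.length
decreasing_by
  have h1 := pvB_op_len s op rest hop
  have h2 := pvB_part_len rest
  rw [hpt] at h2
  simp at h2
  omega

def parse_filter_string_alt (filterstring : String) : List (String × String) :=
  (pvB_go filterstring.toList).getD []

-- ===== PRECONDITION & SPEC =====
-- Pre_ excludes exactly the inputs on which A raises ValueError (a comma-token that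
-- does not start with '<', '>' or '=='); B raises ValueError there too.
def pvTokOK (filt : List Char) : Bool :=
  match filt with
  | '<' :: _ => true
  | '>' :: _ => true
  | '=' :: '=' :: _ => true
  | _ => false

def Pre_parse_filter_string (filterstring : String) : Prop :=
  (PySem.Chars.splitOn filterstring.toList [',']).all pvTokOK = true
instance (filterstring : String) : Decidable (Pre_parse_filter_string filterstring) := by
  unfold Pre_parse_filter_string; infer_instance

def pvWitness_parse_filter_string : String := "<energy,<=natoms"

def Spec_parse_filter_string (filterstring : String) (out : List (String × String)) : Prop := out = parse_filter_string_alt filterstring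
instance (filterstring : String) (out : List (String × String)) : Decidable (Spec_parse_filter_string filterstring out) := by unfold Spec_parse_filter_string; infer_instance

-- ===== CLAIM (what is proved, stated in full; the proofs are below) =====
def Claim_equal_parse_filter_string : Prop := ∀ (filterstring : String), Dom_parse_filter_string filterstring → Pre_parse_filter_string filterstring → Spec_parse_filter_string filterstring (parse_filter_string filterstring)

-- ===== LEMMAS AND PROOFS =====

-- a simple functional model of split(',') to reason about both ports through
def pvSp : List Char → List (List Char)
  | [] => [[]]
  | c :: rest =>
    if c = ',' then [] :: pvSp rest
    else
      match pvSp rest with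
      | [] => [[c]]
      | t :: ts => (c :: t) :: ts

theorem pvSp_ne (s : List Char) : pvSp s ≠ [] := by
  cases s with
  | nil => simp [pvSp]
  | cons c rest =>
    by_cases h : c = ','
    · simp [pvSp, h]
    · simp only [pvSp, h, if_false]
      cases pvSp rest <;> simp

def pvConsHead (p : List Char) : List (List Char) → List (List Char)
  | [] => [p]
  | t :: ts => (p ++ t) :: ts

theorem pvConsHead_nil (l : List (List Char)) (h : l ≠ []) : pvConsHead [] l = l := by
  cases l with
  | nil => exact absurd rfl h
  | cons t ts => simp [pvConsHead]

theorem splitOn_go_eq (fuel : Nat) :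
    ∀ (l cur : List Char) (acc : List (List Char)), l.length < fuel →
      PySem.Chars.splitOn.go [','] fuel l cur acc
        = acc.reverse ++ pvConsHead cur.reverse (pvSp l) := by
  induction fuel with
  | zero => intro l cur acc h; omega
  | succ f ih =>
    intro l cur acc h
    cases l with
    | nil =>
      simp [PySem.Chars.splitOn.go, pvSp, pvConsHead]
    | cons c rest =>
      by_cases hc : c = ','
      · subst hc
        have hpre : List.isPrefixOf [','] (',' :: rest) = true := by
          simp [List.isPrefixOf]
        rw [show PySem.Chars.splitOn.go [','] (f + 1) (',' :: rest) cur acc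
              = PySem.Chars.splitOn.go [','] f rest [] (cur.reverse :: acc) by
            simp [PySem.Chars.splitOn.go, hpre]]
        rw [ih rest [] (cur.reverse :: acc) (by simp at h; omega)]
        simp only [List.reverse_nil]
        rw [pvConsHead_nil _ (pvSp_ne rest)]
        simp [pvSp, pvConsHead]
      · have hpre : List.isPrefixOf [','] (c :: rest) = false := by
          simp [List.isPrefixOf, Ne.symm hc]
        rw [show PySem.Chars.splitOn.go [','] (f + 1) (c :: rest) cur acc
              = PySem.Chars.splitOn.go [','] f rest (c :: cur) acc by
            simp [PySem.Chars.splitOn.go, hpre]]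
        rw [ih rest (c :: cur) acc (by simp at h; omega)]
        simp only [pvSp, hc, if_false]
        cases hsp : pvSp rest with
        | nil => exact absurd hsp (pvSp_ne rest)
        | cons t ts => simp [pvConsHead]

theorem splitOn_eq_pvSp (s : List Char) :
    PySem.Chars.splitOn s [','] = pvSp s := by
  unfold PySem.Chars.splitOn
  rw [splitOn_go_eq (s.length + 1) s [] [] (by omega)]
  simp [pvConsHead_nil _ (pvSp_ne s)]

-- partition facts
theorem part_no_comma (k : List Char) (h : ',' ∉ k) : pvB_part k = (k, false, []) := by
  induction k with
  | nil => simp [pvB_part]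
  | cons c t ih =>
    simp only [List.mem_cons, not_or] at h
    simp [pvB_part, Ne.symm h.1, ih h.2]

theorem part_comma (k r : List Char) (h : ',' ∉ k) :
    pvB_part (k ++ ',' :: r) = (k, true, r) := by
  induction k with
  | nil => simp [pvB_part]
  | cons c t ih =>
    simp only [List.mem_cons, not_or] at h
    simp [pvB_part, Ne.symm h.1, ih h.2]

theorem pvSp_no_comma (k : List Char) (h : ',' ∉ k) : pvSp k = [k] := by
  induction k with
  | nil => rfl
  | cons c t ih =>
    simp only [List.mem_cons, not_or] at h
    simp [pvSp, Ne.symm h.1, ih h.2]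

theorem pvSp_comma (k r : List Char) (h : ',' ∉ k) :
    pvSp (k ++ ',' :: r) = k :: pvSp r := by
  induction k with
  | nil => simp [pvSp]
  | cons c t ih =>
    simp only [List.mem_cons, not_or] at h
    rw [List.cons_append]
    have hc : ¬ c = ',' := fun hh => h.1 hh.symm
    simp only [pvSp, hc, if_false, ih h.2]

-- shape of a string in terms of its partition
theorem part_shape (s : List Char) :
    ∃ k b r, pvB_part s = (k, b, r) ∧ ',' ∉ k ∧
      s = k ++ (if b then ',' :: r else []) := by
  induction s with
  | nil => exact ⟨[], false, [], rfl, by simp, by simp⟩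
  | cons c t ih =>
    by_cases hc : c = ','
    · subst hc
      exact ⟨[], true, t, by simp [pvB_part], by simp, by simp⟩
    · obtain ⟨k, b, r, h1, h2, h3⟩ := ih
      refine ⟨c :: k, b, r, ?_, ?_, ?_⟩
      · simp [pvB_part, hc, h1]
      · simp [h2]; exact fun hh => hc hh.symm
      · simpa using h3

-- A's per-token value on each admissible token shape
theorem tokA_lt_eq (t : List Char) :
    pvA_tok ('<' :: '=' :: t) = some ("<=", String.ofList t) := by
  simp [pvA_tok, pvA_findOp, PySem.Chars.startswith, List.isPrefixOf, PySem.List.slice_from,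
    List.drop]

theorem tokA_gt_eq (t : List Char) :
    pvA_tok ('>' :: '=' :: t) = some (">=", String.ofList t) := by
  simp [pvA_tok, pvA_findOp, PySem.Chars.startswith, List.isPrefixOf, PySem.List.slice_from,
    List.drop]

theorem tokA_eq_eq (t : List Char) :
    pvA_tok ('=' :: '=' :: t) = some ("==", String.ofList t) := by
  simp [pvA_tok, pvA_findOp, PySem.Chars.startswith, List.isPrefixOf, PySem.List.slice_from,
    List.drop]

theorem tokA_lt (d : Char) (t : List Char) (hd : d ≠ '=') :
    pvA_tok ('<' :: d :: t) = some ("<", String.ofList (d :: t)) := by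
  have hd' : ¬ ('=' = d) := fun hh => hd hh.symm
  simp [pvA_tok, pvA_findOp, PySem.Chars.startswith, List.isPrefixOf, hd',
    PySem.List.slice_from, List.drop]

theorem tokA_gt (d : Char) (t : List Char) (hd : d ≠ '=') :
    pvA_tok ('>' :: d :: t) = some (">", String.ofList (d :: t)) := by
  have hd' : ¬ ('=' = d) := fun hh => hd hh.symm
  simp [pvA_tok, pvA_findOp, PySem.Chars.startswith, List.isPrefixOf, hd',
    PySem.List.slice_from, List.drop]

theorem tokA_lt1 : pvA_tok ['<'] = some ("<", "") := by
  simp [pvA_tok, pvA_findOp, PySem.Chars.startswith, List.isPrefixOf, PySem.List.slice_from,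
    List.drop]

theorem tokA_gt1 : pvA_tok ['>'] = some (">", "") := by
  simp [pvA_tok, pvA_findOp, PySem.Chars.startswith, List.isPrefixOf, PySem.List.slice_from,
    List.drop]

-- admissible tokens start with '<', '>' or '=='
theorem pvTokOK_shape (k : List Char) (h : pvTokOK k = true) :
    (∃ t, k = '<' :: t) ∨ (∃ t, k = '>' :: t) ∨ (∃ t, k = '=' :: '=' :: t) := by
  unfold pvTokOK at h
  split at h
  · exact Or.inl ⟨_, rfl⟩
  · exact Or.inr (Or.inl ⟨_, rfl⟩)
  · exact Or.inr (Or.inr ⟨_, rfl⟩)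
  · exact absurd h (by simp)

-- conditional unfolding lemmas for pvB_go's while loop
theorem pvB_go_cont (s op rest key r : List Char)
    (h1 : pvB_op s = some (op, rest)) (h2 : pvB_part rest = (key, true, r)) :
    pvB_go s = (pvB_go r).map ((String.ofList op, String.ofList key) :: ·) := by
  rw [pvB_go]
  split
  · next hop => rw [h1] at hop; cases hop
  · next op' rest' hop =>
    rw [h1] at hop
    cases hop
    split
    · next key' r' hpt => rw [h2] at hpt; cases hpt; rfl
    · next key' r' hpt => rw [h2] at hpt; cases hpt

theorem pvB_go_last (s op rest key junk : List Char)
    (h1 : pvB_op s = some (op, rest)) (h2 : pvB_part rest = (key, false, junk)) :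
    pvB_go s = some [(String.ofList op, String.ofList key)] := by
  rw [pvB_go]
  split
  · next hop => rw [h1] at hop; cases hop
  · next op' rest' hop =>
    rw [h1] at hop
    cases hop
    split
    · next key' r' hpt => rw [h2] at hpt; cases hpt
    · next key' r' hpt => rw [h2] at hpt; cases hpt; rfl

-- one step of B marries one step of A (continuing / last token)
theorem bridge_cont (s k r op rest key : List Char) (p : String × String)
    (hop : pvB_op s = some (op, rest))
    (hpt : pvB_part rest = (key, true, r))
    (hsp : pvSp s = k :: pvSp r)
    (htok : pvA_tok k = some p)
    (hkey : (String.ofList op, String.ofList key) = p)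
    (hih : pvB_go r = pvA_go (pvSp r)) :
    pvB_go s = pvA_go (pvSp s) := by
  rw [pvB_go_cont s op rest key r hop hpt, hsp, hih]
  simp [pvA_go, htok, hkey]

theorem bridge_last (s k op rest key junk : List Char) (p : String × String)
    (hop : pvB_op s = some (op, rest))
    (hpt : pvB_part rest = (key, false, junk))
    (hsp : pvSp s = [k])
    (htok : pvA_tok k = some p)
    (hkey : (String.ofList op, String.ofList key) = p) :
    pvB_go s = pvA_go (pvSp s) := by
  rw [pvB_go_last s op rest key junk hop hpt, hsp]
  simp [pvA_go, htok, hkey]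

-- main bridge: B's streaming pass equals A's split-then-scan on admissible inputs
theorem main_go (n : Nat) : ∀ (s : List Char), s.length ≤ n →
    (pvSp s).all pvTokOK = true → pvB_go s = pvA_go (pvSp s) := by
  induction n with
  | zero =>
    intro s hlen hall
    have hs : s = [] := by cases s <;> simp_all
    subst hs
    simp [pvSp, pvTokOK] at hall
  | succ n ih =>
    intro s hlen hall
    obtain ⟨k, b, r, hpart, hkc, hshape⟩ := part_shape s
    have hkOK : pvTokOK k = true := by
      cases b
      · have : pvSp s = [k] := by rw [hshape]; simpa using pvSp_no_comma k hkc
        rw [this] at hall; simpa using hall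
      · have : pvSp s = k :: pvSp r := by rw [hshape]; simpa using pvSp_comma k r hkc
        rw [this] at hall; simp at hall; exact hall.1
    rcases pvTokOK_shape k hkOK with ⟨kt, rfl⟩ | ⟨kt, rfl⟩ | ⟨dt, rfl⟩
    · -- token starts with '<'
      cases kt with
      | nil =>
        cases b
        · have hs : s = ['<'] := by simpa using hshape
          subst hs
          exact bridge_last _ ['<'] ['<'] [] [] [] ("<", "")
            (by simp [pvB_op]) rfl (by simp [pvSp]) tokA_lt1 rfl
        · have hs : s = '<' :: ',' :: r := by simpa using hshape
          subst hs
          have hsp : pvSp ('<' :: ',' :: r) = ['<'] :: pvSp r := by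
            simpa using pvSp_comma ['<'] r (by simp)
          have hall2 : (pvSp r).all pvTokOK = true := by
            rw [hsp, List.all_cons, Bool.and_eq_true] at hall
            exact hall.2
          exact bridge_cont _ ['<'] r ['<'] (',' :: r) [] ("<", "")
            (by simp [pvB_op]) (by simp [pvB_part]) hsp tokA_lt1 rfl
            (ih r (by simp at hlen; omega) hall2)
      | cons d dt =>
        have hddt : ',' ∉ d :: dt := fun hm => hkc (List.mem_cons_of_mem _ hm)
        have hdtc : ',' ∉ dt := fun hm => hddt (List.mem_cons_of_mem _ hm)
        by_cases hd : d = '='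
        · subst hd
          cases b
          · have hs : s = '<' :: '=' :: dt := by simpa using hshape
            subst hs
            exact bridge_last _ ('<' :: '=' :: dt) ['<', '='] dt dt [] ("<=", String.ofList dt)
              (by simp [pvB_op]) (part_no_comma dt hdtc)
              (by simpa using pvSp_no_comma _ hkc) (tokA_lt_eq dt) rfl
          · have hs : s = '<' :: '=' :: (dt ++ ',' :: r) := by simpa using hshape
            subst hs
            have hsp : pvSp ('<' :: '=' :: (dt ++ ',' :: r)) = ('<' :: '=' :: dt) :: pvSp r := by
              simpa using pvSp_comma ('<' :: '=' :: dt) r hkc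
            have hall2 : (pvSp r).all pvTokOK = true := by
              rw [hsp, List.all_cons, Bool.and_eq_true] at hall
              exact hall.2
            exact bridge_cont _ ('<' :: '=' :: dt) r ['<', '='] (dt ++ ',' :: r) dt
              ("<=", String.ofList dt)
              (by simp [pvB_op]) (part_comma dt r hdtc) hsp (tokA_lt_eq dt) rfl
              (ih r (by simp at hlen; omega) hall2)
        · cases b
          · have hs : s = '<' :: d :: dt := by simpa using hshape
            subst hs
            exact bridge_last _ ('<' :: d :: dt) ['<'] (d :: dt) (d :: dt) []
              ("<", String.ofList (d :: dt))
              (by simp [pvB_op, hd]) (part_no_comma (d :: dt) hddt)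
              (by simpa using pvSp_no_comma _ hkc) (tokA_lt d dt hd) rfl
          · have hs : s = '<' :: d :: (dt ++ ',' :: r) := by simpa using hshape
            subst hs
            have hsp : pvSp ('<' :: d :: (dt ++ ',' :: r)) = ('<' :: d :: dt) :: pvSp r := by
              simpa using pvSp_comma ('<' :: d :: dt) r hkc
            have hall2 : (pvSp r).all pvTokOK = true := by
              rw [hsp, List.all_cons, Bool.and_eq_true] at hall
              exact hall.2
            exact bridge_cont _ ('<' :: d :: dt) r ['<'] (d :: (dt ++ ',' :: r)) (d :: dt)
              ("<", String.ofList (d :: dt))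
              (by simp [pvB_op, hd]) (part_comma (d :: dt) r hddt) hsp (tokA_lt d dt hd) rfl
              (ih r (by simp at hlen; omega) hall2)
    · -- token starts with '>'
      cases kt with
      | nil =>
        cases b
        · have hs : s = ['>'] := by simpa using hshape
          subst hs
          exact bridge_last _ ['>'] ['>'] [] [] [] (">", "")
            (by simp [pvB_op]) rfl (by simp [pvSp]) tokA_gt1 rfl
        · have hs : s = '>' :: ',' :: r := by simpa using hshape
          subst hs
          have hsp : pvSp ('>' :: ',' :: r) = ['>'] :: pvSp r := by
            simpa using pvSp_comma ['>'] r (by simp)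
          have hall2 : (pvSp r).all pvTokOK = true := by
            rw [hsp, List.all_cons, Bool.and_eq_true] at hall
            exact hall.2
          exact bridge_cont _ ['>'] r ['>'] (',' :: r) [] (">", "")
            (by simp [pvB_op]) (by simp [pvB_part]) hsp tokA_gt1 rfl
            (ih r (by simp at hlen; omega) hall2)
      | cons d dt =>
        have hddt : ',' ∉ d :: dt := fun hm => hkc (List.mem_cons_of_mem _ hm)
        have hdtc : ',' ∉ dt := fun hm => hddt (List.mem_cons_of_mem _ hm)
        by_cases hd : d = '='
        · subst hd
          cases b
          · have hs : s = '>' :: '=' :: dt := by simpa using hshape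
            subst hs
            exact bridge_last _ ('>' :: '=' :: dt) ['>', '='] dt dt [] (">=", String.ofList dt)
              (by simp [pvB_op]) (part_no_comma dt hdtc)
              (by simpa using pvSp_no_comma _ hkc) (tokA_gt_eq dt) rfl
          · have hs : s = '>' :: '=' :: (dt ++ ',' :: r) := by simpa using hshape
            subst hs
            have hsp : pvSp ('>' :: '=' :: (dt ++ ',' :: r)) = ('>' :: '=' :: dt) :: pvSp r := by
              simpa using pvSp_comma ('>' :: '=' :: dt) r hkc
            have hall2 : (pvSp r).all pvTokOK = true := by
              rw [hsp, List.all_cons, Bool.and_eq_true] at hall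
              exact hall.2
            exact bridge_cont _ ('>' :: '=' :: dt) r ['>', '='] (dt ++ ',' :: r) dt
              (">=", String.ofList dt)
              (by simp [pvB_op]) (part_comma dt r hdtc) hsp (tokA_gt_eq dt) rfl
              (ih r (by simp at hlen; omega) hall2)
        · cases b
          · have hs : s = '>' :: d :: dt := by simpa using hshape
            subst hs
            exact bridge_last _ ('>' :: d :: dt) ['>'] (d :: dt) (d :: dt) []
              (">", String.ofList (d :: dt))
              (by simp [pvB_op, hd]) (part_no_comma (d :: dt) hddt)
              (by simpa using pvSp_no_comma _ hkc) (tokA_gt d dt hd) rfl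
          · have hs : s = '>' :: d :: (dt ++ ',' :: r) := by simpa using hshape
            subst hs
            have hsp : pvSp ('>' :: d :: (dt ++ ',' :: r)) = ('>' :: d :: dt) :: pvSp r := by
              simpa using pvSp_comma ('>' :: d :: dt) r hkc
            have hall2 : (pvSp r).all pvTokOK = true := by
              rw [hsp, List.all_cons, Bool.and_eq_true] at hall
              exact hall.2
            exact bridge_cont _ ('>' :: d :: dt) r ['>'] (d :: (dt ++ ',' :: r)) (d :: dt)
              (">", String.ofList (d :: dt))
              (by simp [pvB_op, hd]) (part_comma (d :: dt) r hddt) hsp (tokA_gt d dt hd) rfl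
              (ih r (by simp at hlen; omega) hall2)
    · -- token starts with "=="
      have hdtc : ',' ∉ dt := fun hm => hkc (by simp [hm])
      cases b
      · have hs : s = '=' :: '=' :: dt := by simpa using hshape
        subst hs
        exact bridge_last _ ('=' :: '=' :: dt) ['=', '='] dt dt [] ("==", String.ofList dt)
          (by simp [pvB_op]) (part_no_comma dt hdtc)
          (by simpa using pvSp_no_comma _ hkc) (tokA_eq_eq dt) rfl
      · have hs : s = '=' :: '=' :: (dt ++ ',' :: r) := by simpa using hshape
        subst hs
        have hsp : pvSp ('=' :: '=' :: (dt ++ ',' :: r)) = ('=' :: '=' :: dt) :: pvSp r := by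
          simpa using pvSp_comma ('=' :: '=' :: dt) r hkc
        have hall2 : (pvSp r).all pvTokOK = true := by
          rw [hsp, List.all_cons, Bool.and_eq_true] at hall
          exact hall.2
        exact bridge_cont _ ('=' :: '=' :: dt) r ['=', '='] (dt ++ ',' :: r) dt
          ("==", String.ofList dt)
          (by simp [pvB_op]) (part_comma dt r hdtc) hsp (tokA_eq_eq dt) rfl
          (ih r (by simp at hlen; omega) hall2)

-- ===== VERDICT (by name: the statement is the Claim_ definition above) =====
theorem parse_filter_string_spec : Claim_equal_parse_filter_string := by
  intro s _ hpre
  unfold Spec_parse_filter_string parse_filter_string parse_filter_string_alt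
  unfold Pre_parse_filter_string at hpre
  rw [splitOn_eq_pvSp] at hpre ⊢
  rw [main_go s.toList.length s.toList le_rfl hpre]
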